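-- pv_equiv track=rewrite | github.com/DoStini/FEUP-FPRO | Play/Week6/play_min_path.py | min_path
-- ===== SOURCE A (Python) =====
-- def min_path(path):
--     stack = []
--     for a in path:
--         if len(stack) != 0 and opposite(a) == stack[-1]:
--             stack.pop()
--         else:
--             stack.append(a)
--     return stack
--
-- def opposite(dir_):
--     if dir_ == "UP":
--         return "DOWN"
--     elif dir_ == "DOWN":
--         return "UP"
--     elif dir_ == "RIGHT":
--         return "LEFT"
--     elif dir_ == "LEFT":
--         return "RIGHT"
-- ===== SOURCE B (Python) =====
-- def min_path(path):
--     # Repeated-pair-elimination fixed point: scan front-to-back removing each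
--     # adjacent canceling pair, and repeat the whole scan until nothing changes.
--     cur = list(path)
--     while True:
--         nxt = one_pass(cur)
--         if nxt == cur:
--             return cur
--         cur = nxt
--
--
-- def one_pass(lst):
--     out = []
--     i = 0
--     n = len(lst)
--     while i < n:
--         if i + 1 < n and opposite(lst[i + 1]) == lst[i]:
--             i += 2
--         else:
--             out.append(lst[i])
--             i += 1
--     return out
--
--
-- def opposite(dir_):
--     if dir_ == "UP":
--         return "DOWN"
--     elif dir_ == "DOWN":
--         return "UP"
--     elif dir_ == "RIGHT":
--         return "LEFT"
--     elif dir_ == "LEFT":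
--         return "RIGHT"
-- ===== Notes on version B (the rewrite author's own statement) =====
-- stated objective: alternative
-- what changed: Replaces the single stack pass with a repeated adjacent-pair-elimination scan iterated to a fixed point (same cancellation predicate, no stack).
import Mathlib
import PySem

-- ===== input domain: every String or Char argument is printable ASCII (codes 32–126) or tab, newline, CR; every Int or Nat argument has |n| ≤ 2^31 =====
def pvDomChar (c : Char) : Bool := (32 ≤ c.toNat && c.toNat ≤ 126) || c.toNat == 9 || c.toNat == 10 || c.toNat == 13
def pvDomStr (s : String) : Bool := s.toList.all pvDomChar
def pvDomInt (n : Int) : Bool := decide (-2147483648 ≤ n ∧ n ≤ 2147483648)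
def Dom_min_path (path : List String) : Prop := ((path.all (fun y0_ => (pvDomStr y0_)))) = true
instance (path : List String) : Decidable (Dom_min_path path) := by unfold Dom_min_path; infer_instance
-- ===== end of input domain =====

-- B replaces A's single stack pass by an adjacent-pair-elimination scan iterated to a
-- fixed point (same cancellation predicate); alternative decomposition, not faster.

-- ===== PORT A =====
def opposite (dir_ : String) : Option String :=
  if dir_ = "UP" then some "DOWN"
  else if dir_ = "DOWN" then some "UP"
  else if dir_ = "RIGHT" then some "LEFT"
  else if dir_ = "LEFT" then some "RIGHT"
  else none

def min_path (path : List String) : List String :=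
  path.foldl (fun stack a =>
    if stack.length ≠ 0 ∧ opposite a = PySem.List.pyGet? stack (-1)
    then stack.dropLast
    else stack ++ [a]) []

-- ===== PORT B =====
-- one front-to-back scan: drop each adjacent canceling pair, keep the rest
def onePass : List String → List String
  | [] => []
  | [a] => [a]
  | x :: y :: t => if opposite y = some x then onePass t else x :: onePass (y :: t)

-- the while-True loop of Source B, with enough fuel to reach the fixed point
def passLoop : Nat → List String → List String
  | 0, cur => cur
  | fuel + 1, cur =>
    let nxt := onePass cur
    if nxt = cur then cur else passLoop fuel nxt

def min_path_alt (path : List String) : List String :=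
  passLoop (path.length + 1) path

-- ===== PRECONDITION & SPEC =====
def Spec_min_path (path : List String) (out : List String) : Prop := out = min_path_alt path
instance (path : List String) (out : List String) : Decidable (Spec_min_path path out) := by unfold Spec_min_path; infer_instance

-- ===== CLAIM (what is proved, stated in full; the proofs are below) =====
def Claim_equal_min_path : Prop := ∀ (path : List String), Dom_min_path path → Spec_min_path path (min_path path)

-- ===== LEMMAS AND PROOFS =====

-- A's loop body
def stepA (stack : List String) (a : String) : List String :=
  if stack.length ≠ 0 ∧ opposite a = PySem.List.pyGet? stack (-1)
  then stack.dropLast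
  else stack ++ [a]

theorem min_path_eq_foldl (path : List String) : min_path path = path.foldl stepA [] := rfl

-- "irreducible" stacks: no adjacent canceling pair
def NoCancel (a b : String) : Prop := opposite b ≠ some a

def Irred (l : List String) : Prop := List.IsChain NoCancel l

-- opposite is a (partial) involution
theorem opposite_invol {x y : String} (h : opposite y = some x) : opposite x = some y := by
  unfold opposite at h ⊢
  split_ifs at h with h1 h2 h3 h4
  · obtain rfl : x = "DOWN" := (Option.some.inj h).symm
    simp_all
  · obtain rfl : x = "UP" := (Option.some.inj h).symm
    simp_all
  · obtain rfl : x = "LEFT" := (Option.some.inj h).symm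
    simp_all
  · obtain rfl : x = "RIGHT" := (Option.some.inj h).symm
    simp_all

theorem opposite_inj {x y z : String} (h1 : opposite y = some x) (h2 : opposite z = some x) :
    y = z :=
  Option.some.inj ((opposite_invol h1).symm.trans (opposite_invol h2))

theorem stepA_push {s : List String} {a : String}
    (h : ¬ (s.length ≠ 0 ∧ opposite a = PySem.List.pyGet? s (-1))) :
    stepA s a = s ++ [a] := by
  unfold stepA; rw [if_neg h]

theorem stepA_pop {s : List String} {a : String}
    (h : s.length ≠ 0 ∧ opposite a = PySem.List.pyGet? s (-1)) :
    stepA s a = s.dropLast := by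
  unfold stepA; rw [if_pos h]

theorem irred_stepA {s : List String} (hs : Irred s) (a : String) : Irred (stepA s a) := by
  unfold stepA
  split_ifs with h
  · exact List.IsChain.dropLast hs
  · rcases s.eq_nil_or_concat with rfl | ⟨t, A, hsa⟩
    · simpa [Irred] using List.isChain_singleton (R := NoCancel) a
    · rw [List.concat_eq_append] at hsa
      subst hsa
      push_neg at h
      refine List.IsChain.append hs (List.isChain_singleton a) ?_
      intro x hx y hy
      simp at hx hy
      subst hx; subst hy
      have hne := h (by simp)
      rw [PySem.List.pyGet?_neg_one] at hne
      simp at hne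
      simpa [NoCancel] using fun hc => hne (by simp [hc])

-- the key cancellation step: on an irreducible stack, pushing x then y (a canceling pair)
-- returns the stack unchanged
theorem stepA_cancel {s : List String} {x y : String} (hs : Irred s)
    (hxy : opposite y = some x) : stepA (stepA s x) y = s := by
  rcases s.eq_nil_or_concat with rfl | ⟨t, A, hsa⟩
  · have h1 : stepA ([] : List String) x = [x] := by
      rw [stepA_push] <;> simp
    rw [h1, stepA_pop] <;> simp [PySem.List.pyGet?_neg_one, hxy]
  · rw [List.concat_eq_append] at hsa
    subst hsa
    by_cases hcan : opposite x = some A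
    · -- x cancels with the top A; then y (= A) is pushed back
      have hx1 : stepA (t ++ [A]) x = t := by
        rw [stepA_pop]
        · simp
        · exact ⟨by simp, by rw [PySem.List.pyGet?_neg_one]; simp [hcan]⟩
      have hyA : y = A := opposite_inj hxy (opposite_invol hcan)
      rw [hx1]
      rcases t.eq_nil_or_concat with rfl | ⟨t2, B, hta⟩
      · rw [stepA_push] <;> simp [hyA]
      · rw [List.concat_eq_append] at hta
        subst hta
        -- irreducibility: NoCancel B A, and opposite A = some x
        have hAB : NoCancel B A := by
          unfold Irred at hs
          rw [List.isChain_append] at hs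
          exact hs.2.2 B (by simp) A (by simp)
        have hAx : opposite A = some x := opposite_invol hcan
        have hne : opposite y ≠ some B := by
          rw [hxy]
          intro hc
          exact hAB (by rw [hAx, Option.some.inj hc])
        rw [stepA_push]
        · simp [hyA]
        · push_neg
          intro _
          rw [PySem.List.pyGet?_neg_one]
          simp [hne]
    · have hx1 : stepA (t ++ [A]) x = (t ++ [A]) ++ [x] := by
        rw [stepA_push]
        push_neg
        intro _
        rw [PySem.List.pyGet?_neg_one]
        simp [hcan]
      rw [hx1, stepA_pop]
      · simp
      · exact ⟨by simp, by rw [PySem.List.pyGet?_neg_one]; simp [hxy]⟩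

-- folding one scan-pass result equals folding the original list, from any irreducible stack
theorem foldl_onePass (m : List String) : ∀ s : List String, Irred s →
    List.foldl stepA s (onePass m) = List.foldl stepA s m := by
  induction m using onePass.induct with
  | case1 => intro s _; rfl
  | case2 a => intro s _; rfl
  | case3 x y t hc ih =>
    intro s hs
    rw [onePass, if_pos hc, ih s hs]
    show _ = List.foldl stepA (stepA (stepA s x) y) t
    rw [stepA_cancel hs hc]
  | case4 x y t hc ih =>
    intro s hs
    rw [onePass, if_neg hc]
    show List.foldl stepA (stepA s x) (onePass (y :: t)) = List.foldl stepA (stepA s x) (y :: t)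
    exact ih (stepA s x) (irred_stepA hs x)

theorem onePass_length_le (m : List String) : (onePass m).length ≤ m.length := by
  induction m using onePass.induct with
  | case1 => simp [onePass]
  | case2 a => simp [onePass]
  | case3 x y t hc ih => rw [onePass, if_pos hc]; simp; omega
  | case4 x y t hc ih => rw [onePass, if_neg hc]; simp at ih ⊢; omega

theorem onePass_progress (m : List String) :
    onePass m = m ∨ (onePass m).length + 2 ≤ m.length := by
  induction m using onePass.induct with
  | case1 => left; rfl
  | case2 a => left; rfl
  | case3 x y t hc _ =>
    right
    rw [onePass, if_pos hc]
    have := onePass_length_le t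
    simp; omega
  | case4 x y t hc ih =>
    rw [onePass, if_neg hc]
    rcases ih with h | h
    · left; rw [h]
    · right; simp at h ⊢; omega

-- a fixed point of the scan has no adjacent canceling pair
theorem irred_of_onePass_fix : ∀ m : List String, onePass m = m → Irred m := by
  intro m
  induction m using onePass.induct with
  | case1 => intro _; exact List.IsChain.nil
  | case2 a => intro _; exact List.isChain_singleton a
  | case3 x y t hc _ =>
    intro hfix
    exfalso
    rw [onePass, if_pos hc] at hfix
    have := onePass_length_le t
    have := congrArg List.length hfix
    simp at this; omega
  | case4 x y t hc ih =>
    intro hfix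
    rw [onePass, if_neg hc] at hfix
    have h2 : onePass (y :: t) = y :: t := by
      injection hfix
    exact List.isChain_cons.mpr ⟨fun z hz => by
      cases t <;> simp at hz <;> subst hz <;> exact hc, ih h2⟩

-- with enough fuel, passLoop reaches a fixed point of onePass
theorem passLoop_fix : ∀ fuel : Nat, ∀ l : List String, l.length < fuel →
    onePass (passLoop fuel l) = passLoop fuel l := by
  intro fuel
  induction fuel with
  | zero => intro l h; omega
  | succ n ih =>
    intro l h
    rw [passLoop]
    by_cases hfix : onePass l = l
    · simp [hfix]
    · simp only [if_neg hfix]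
      apply ih
      rcases onePass_progress l with h2 | h2
      · exact absurd h2 hfix
      · omega

-- folding passLoop's result equals folding the original list (from the empty stack)
theorem foldl_passLoop : ∀ fuel : Nat, ∀ l : List String,
    List.foldl stepA [] (passLoop fuel l) = List.foldl stepA [] l := by
  intro fuel
  induction fuel with
  | zero => intro l; rfl
  | succ n ih =>
    intro l
    rw [passLoop]
    by_cases hfix : onePass l = l
    · simp [hfix]
    · simp only [if_neg hfix]
      rw [ih (onePass l), foldl_onePass l [] List.IsChain.nil]

-- A's fold leaves an irreducible list unchanged
theorem foldl_of_irred : ∀ l s : List String, Irred (s ++ l) → List.foldl stepA s l = s ++ l := by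
  intro l
  induction l with
  | nil => intro s _; simp
  | cons a rest ih =>
    intro s hs
    have hpush : stepA s a = s ++ [a] := by
      rcases s.eq_nil_or_concat with rfl | ⟨t, A, hsa⟩
      · rw [stepA_push]; simp
      · rw [List.concat_eq_append] at hsa
        subst hsa
        have hR : NoCancel A a := by
          unfold Irred at hs
          rw [List.isChain_append] at hs
          exact hs.2.2 A (by simp) a (by simp)
        rw [stepA_push]
        push_neg
        intro _
        rw [PySem.List.pyGet?_neg_one]
        simpa [NoCancel] using fun hc => hR (by simp [hc])
    show List.foldl stepA (stepA s a) rest = s ++ a :: rest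
    rw [hpush, ih (s ++ [a]) (by simpa using hs)]
    simp

-- ===== VERDICT (by name: the statement is the Claim_ definition above) =====
theorem min_path_spec : Claim_equal_min_path := by
  intro path _
  unfold Spec_min_path min_path_alt
  rw [min_path_eq_foldl, ← foldl_passLoop (path.length + 1) path]
  set l := passLoop (path.length + 1) path with hl
  have hfix : onePass l = l := passLoop_fix (path.length + 1) path (by omega)
  have := foldl_of_irred l [] (by simpa using irred_of_onePass_fix l hfix)
  simpa using this
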